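-- pv_equiv track=rewrite | github.com/jinStar-kimmy/algorithm | Algorithm/exam/CodingTest2/test03.py | solution
-- ===== SOURCE A (Python) =====
-- def solution(candles):
--     days = 1
--     while True:
--         candles.sort(reverse=True)
--         for i in range(days):
--             candles[i] -= 1
--             if candles[i] < 0:
--                 return days - 1
--
--         if days == len(candles):
--             return days
--
--         days += 1
-- ===== SOURCE B (Python) =====
-- def _merge_desc(a, b):
--     out = []
--     i = j = 0
--     while i < len(a) and j < len(b):
--         if a[i] >= b[j]:
--             out.append(a[i]); i += 1
--         else:
--             out.append(b[j]); j += 1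
--     out.extend(a[i:])
--     out.extend(b[j:])
--     return out
--
--
-- def solution(candles):
--     # sort once; each day's decrement of the top `days` keeps both halves sorted,
--     # so a linear merge replaces A's per-day re-sort
--     lst = sorted(candles, reverse=True)
--     n = len(lst)
--     days = 1
--     while True:
--         if lst[days - 1] <= 0:
--             return days - 1
--         if days == n:
--             return days
--         lst = _merge_desc([x - 1 for x in lst[:days]], lst[days:])
--         days += 1
-- ===== Notes on version B (the rewrite author's own statement) =====
-- stated objective: alternative
-- what changed: B sorts once and replaces A's per-day full re-sort of the mutated list by a linear merge of the decremented prefix (still sorted) with the untouched suffix, with an O(1) head test replacing A's element-by-element decrement-and-check loop.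
-- outside the precondition, e.g. on solution([]): A raises IndexError, B raises IndexError
import Mathlib
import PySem

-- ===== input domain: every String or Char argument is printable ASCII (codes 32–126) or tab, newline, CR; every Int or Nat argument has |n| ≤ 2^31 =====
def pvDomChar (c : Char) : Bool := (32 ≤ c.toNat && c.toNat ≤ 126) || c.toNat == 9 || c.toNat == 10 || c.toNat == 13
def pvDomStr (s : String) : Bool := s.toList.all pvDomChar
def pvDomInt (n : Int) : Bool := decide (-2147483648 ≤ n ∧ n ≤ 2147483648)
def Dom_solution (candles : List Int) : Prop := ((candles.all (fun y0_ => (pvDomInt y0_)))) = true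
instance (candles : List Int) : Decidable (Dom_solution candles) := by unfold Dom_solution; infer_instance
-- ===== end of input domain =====

-- B sorts once and replaces A's per-day re-sort by a linear merge of the decremented prefix with the
-- untouched suffix (equivalence is about the RETURN value only: A sorts/mutates its argument in place).

-- ===== PORT A =====
-- sorted(l, reverse=True)
def sortDesc (l : List Int) : List Int := PySem.List.sorted l (fun x => x) true

-- the inner `for i in range(days)` loop: decrement the first d elements, `none` = early `return days - 1`
-- (also `none` where Python would hit IndexError, i.e. d > len(s); unreachable under Pre_)
def burnA : List Int → Nat → Option (List Int)
  | s, 0 => some s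
  | [], _ + 1 => none
  | x :: xs, d + 1 =>
    if x - 1 < 0 then none
    else (burnA xs d).map (fun t => (x - 1) :: t)

-- the `while True` loop; fuel = len(candles) bounds the iterations (days never exceeds len)
def solutionLoop : List Int → Nat → Nat → Int
  | _, _, 0 => 0    -- fuel guard only; unreachable under Pre_
  | l, days, fuel + 1 =>
    match burnA (sortDesc l) days with
    | none => (days : Int) - 1
    | some s' =>
      if days = s'.length then (days : Int)
      else solutionLoop s' (days + 1) fuel

def solution (candles : List Int) : Int := solutionLoop candles 1 candles.length

-- ===== PORT B =====
-- hand-written merge of two descending lists (_merge_desc in Source B)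
def mergeDesc : List Int → List Int → List Int
  | [], b => b
  | a, [] => a
  | x :: a, y :: b =>
    if y ≤ x then x :: mergeDesc a (y :: b) else y :: mergeDesc (x :: a) b
termination_by a b => a.length + b.length

def solutionAltLoop : List Int → Nat → Nat → Int
  | _, _, 0 => 0    -- fuel guard only; unreachable under Pre_
  | s, days, fuel + 1 =>
    match PySem.List.pyGet? s ((days : Int) - 1) with
    | none => 0     -- lst[days-1] IndexError (only reachable from []); unreachable under Pre_
    | some v =>
      if v ≤ 0 then (days : Int) - 1
      else if days = s.length then (days : Int)
      else
        solutionAltLoop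
          (mergeDesc ((PySem.List.slice s none (some (days : Int))).map (fun x => x - 1))
                     (PySem.List.slice s (some (days : Int)) none))
          (days + 1) fuel

def solution_alt (candles : List Int) : Int :=
  solutionAltLoop (sortDesc candles) 1 candles.length

-- ===== PRECONDITION & SPEC =====
-- Pre_ excludes only the empty list, on which A raises IndexError (candles[0] on day 1).
def Pre_solution (candles : List Int) : Prop := candles ≠ []
instance (candles : List Int) : Decidable (Pre_solution candles) := by unfold Pre_solution; infer_instance
def pvWitness_solution : List Int := [3, 2, 1]

def Spec_solution (candles : List Int) (out : Int) : Prop := out = solution_alt candles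
instance (candles : List Int) (out : Int) : Decidable (Spec_solution candles out) := by unfold Spec_solution; infer_instance

-- ===== CLAIM (what is proved, stated in full; the proofs are below) =====
def Claim_equal_solution : Prop := ∀ (candles : List Int), Dom_solution candles → Pre_solution candles → Spec_solution candles (solution candles)

-- ===== LEMMAS AND PROOFS =====

theorem sortDesc_perm (l : List Int) : (sortDesc l).Perm l := PySem.List.sorted_perm l _ _

theorem sortDesc_pairwise (l : List Int) : (sortDesc l).Pairwise (fun a b : Int => b ≤ a) :=
  PySem.List.sorted_pairwise_rev l (fun x => x)

theorem sortDesc_length (l : List Int) : (sortDesc l).length = l.length :=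
  (sortDesc_perm l).length_eq

-- any descending rearrangement of xs is sortDesc xs
theorem sortDesc_eq_of {xs ys : List Int} (hp : ys.Perm xs)
    (hs : ys.Pairwise (fun a b : Int => b ≤ a)) : sortDesc xs = ys :=
  List.Perm.eq_of_pairwise (fun _ _ _ _ h1 h2 => le_antisymm h2 h1)
    (sortDesc_pairwise xs) hs ((sortDesc_perm xs).trans hp.symm)

theorem mergeDesc_perm (a b : List Int) : (mergeDesc a b).Perm (a ++ b) := by
  induction a, b using mergeDesc.induct with
  | case1 b => simp [mergeDesc]
  | case2 a h => simp [mergeDesc]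
  | case3 x a y b hle ih =>
      simp only [mergeDesc, if_pos hle]
      exact (ih.cons x).trans (by rfl)
  | case4 x a y b hle ih =>
      simp only [mergeDesc, if_neg hle]
      refine (ih.cons y).trans ?_
      exact (List.perm_middle).symm

theorem mem_mergeDesc {z : Int} {a b : List Int} :
    z ∈ mergeDesc a b ↔ z ∈ a ∨ z ∈ b := by
  rw [(mergeDesc_perm a b).mem_iff, List.mem_append]

theorem mergeDesc_pairwise {a b : List Int}
    (ha : a.Pairwise (fun a b : Int => b ≤ a)) (hb : b.Pairwise (fun a b : Int => b ≤ a)) :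
    (mergeDesc a b).Pairwise (fun a b : Int => b ≤ a) := by
  induction a, b using mergeDesc.induct with
  | case1 b => simpa [mergeDesc] using hb
  | case2 a h => simpa [mergeDesc] using ha
  | case3 x a y b hle ih =>
      rw [List.pairwise_cons] at ha
      simp only [mergeDesc, if_pos hle]
      rw [List.pairwise_cons]
      refine ⟨?_, ih ha.2 hb⟩
      intro z hz
      rcases mem_mergeDesc.1 hz with h | h
      · exact ha.1 z h
      · rcases List.mem_cons.1 h with rfl | h
        · exact hle
        · exact le_trans ((List.pairwise_cons.1 hb).1 z h) hle
  | case4 x a y b hle ih =>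
      rw [List.pairwise_cons] at hb
      simp only [mergeDesc, if_neg hle]
      rw [List.pairwise_cons]
      refine ⟨?_, ih ha hb.2⟩
      intro z hz
      rcases mem_mergeDesc.1 hz with h | h
      · rcases List.mem_cons.1 h with rfl | h
        · omega
        · exact le_trans ((List.pairwise_cons.1 ha).1 z h) (by omega)
      · exact hb.1 z h

theorem mergeDesc_eq_sortDesc {a b : List Int}
    (ha : a.Pairwise (fun a b : Int => b ≤ a)) (hb : b.Pairwise (fun a b : Int => b ≤ a)) :
    mergeDesc a b = sortDesc (a ++ b) :=
  (sortDesc_eq_of (mergeDesc_perm a b) (mergeDesc_pairwise ha hb)).symm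

-- characterisation of A's inner loop on a descending list
theorem burnA_eq (s : List Int) (d : Nat) (hd : 1 ≤ d) (hlen : d ≤ s.length)
    (hs : s.Pairwise (fun a b : Int => b ≤ a)) :
    burnA s d = if s.getD (d - 1) 0 ≤ 0 then none
                else some ((s.take d).map (fun x => x - 1) ++ s.drop d) := by
  induction s generalizing d with
  | nil => simp at hlen; omega
  | cons x xs ih =>
      match d, hd with
      | 1, _ =>
          by_cases hx : x ≤ 0
          · simp [burnA, hx, show x - 1 < 0 by omega]
          · simp [burnA, hx, show ¬ x - 1 < 0 by omega]
      | (f + 1) + 1, _ =>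
          have hf : f + 1 ≤ xs.length := by simpa using hlen
          rw [List.pairwise_cons] at hs
          have hmem : xs.getD f 0 ∈ xs := by
            rw [List.getD_eq_getElem xs 0 (by omega)]
            exact List.getElem_mem _
          by_cases hx : x ≤ 0
          · have h2 : xs.getD f 0 ≤ 0 := le_trans (hs.1 _ hmem) hx
            rw [List.getD_eq_getElem?_getD] at h2
            simp [burnA, show x - 1 < 0 by omega, h2, List.getD_eq_getElem?_getD]
          · have hrec := ih (f + 1) (by omega) hf hs.2
            simp only [burnA, show ¬ x - 1 < 0 by omega, hrec, if_false]
            by_cases hc : xs[f]?.getD 0 ≤ 0 <;>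
              simp [hc, List.getD_eq_getElem?_getD, List.take_succ_cons, List.drop_succ_cons]

theorem burned_length (s : List Int) (d : Nat) (hlen : d ≤ s.length) :
    ((s.take d).map (fun x : Int => x - 1) ++ s.drop d).length = s.length := by
  simp; omega

theorem burned_pairwise (s : List Int) (d : Nat)
    (hs : s.Pairwise (fun a b : Int => b ≤ a)) :
    ((s.take d).map (fun x : Int => x - 1)).Pairwise (fun a b : Int => b ≤ a) ∧
      (s.drop d).Pairwise (fun a b : Int => b ≤ a) := by
  constructor
  · rw [List.pairwise_map]
    exact (List.Pairwise.sublist (List.take_sublist d s) hs).imp (by intro a b h; omega)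
  · exact List.Pairwise.sublist (List.drop_sublist d s) hs

-- the main loop equivalence
theorem loop_eq (fuel : Nat) : ∀ (days : Nat) (l : List Int), 1 ≤ days → days ≤ l.length →
    solutionLoop l days fuel = solutionAltLoop (sortDesc l) days fuel := by
  induction fuel with
  | zero => intro days l _ _; rfl
  | succ fuel ih =>
      intro days l hd hlen
      have hslen : days ≤ (sortDesc l).length := by rw [sortDesc_length]; exact hlen
      have hs := sortDesc_pairwise l
      have hidx : ((days : Int) - 1) = ((days - 1 : Nat) : Int) := by omega
      have hget : PySem.List.pyGet? (sortDesc l) ((days : Int) - 1)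
          = some ((sortDesc l).getD (days - 1) 0) := by
        rw [hidx, PySem.List.pyGet?_natCast, List.getElem?_eq_getElem (by omega),
          List.getD_eq_getElem _ 0 (by omega)]
      rw [solutionLoop, solutionAltLoop, hget,
        burnA_eq (sortDesc l) days hd hslen hs]
      by_cases hneg : (sortDesc l).getD (days - 1) 0 ≤ 0
      · rw [List.getD_eq_getElem?_getD] at hneg
        simp [hneg, List.getD_eq_getElem?_getD]
      · have hblen := burned_length (sortDesc l) days hslen
        rw [List.getD_eq_getElem?_getD] at hneg
        simp only [List.getD_eq_getElem?_getD, hneg, if_false]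
        rw [hblen, sortDesc_length]
        by_cases hend : days = l.length
        · simp [hend]
        · simp only [hend, if_false]
          have hbp := burned_pairwise (sortDesc l) days hs
          rw [PySem.List.slice_to_natCast, PySem.List.slice_from_natCast,
            mergeDesc_eq_sortDesc hbp.1 hbp.2]
          exact ih (days + 1) _ (by omega) (by rw [burned_length _ _ hslen, sortDesc_length]; omega)

-- ===== VERDICT (by name: the statement is the Claim_ definition above) =====
theorem solution_spec : Claim_equal_solution := by
  intro candles _ hpre
  unfold Spec_solution solution solution_alt
  exact loop_eq candles.length 1 candles (le_refl 1)
    (by cases candles with | nil => exact absurd rfl hpre | cons x xs => simp)
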